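-- pv_equiv track=rewrite | github.com/yael432/HackerRank | Compete/microsoft_coding_competition_2019/Point_Shot_3.py | solverMain
-- ===== SOURCE A (Python) =====
-- import math
-- from bisect import bisect_left
--
-- def solverMain(a_num_shots,a_shots,b_num_shots,b_shots):
--
--
--     a_score = 0
--     b_score = 0
--
--     max_dif = -math.inf
--
--     a_shots.sort()
--     b_shots.sort()
--
--     for i in a_shots:
--         a_2_shots = bisect_left(a_shots, i)
--         b_2_shots = bisect_left(b_shots, i)
--
--         temp_a_score = a_2_shots*2+(a_num_shots-a_2_shots)*3
--         temp_b_score = b_2_shots * 2 + (b_num_shots - b_2_shots) * 3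
--         score_dif = temp_a_score-temp_b_score
--
--         if score_dif > max_dif:
--             max_dif = score_dif
--
--             a_score = temp_a_score
--             b_score = temp_b_score
--
--         elif score_dif == max_dif:
--             if a_score < temp_a_score:
--                 a_score = temp_a_score
--                 b_score = temp_b_score
--
--     for i in b_shots:
--         a_2_shots = bisect_left(a_shots, i)
--         b_2_shots = bisect_left(b_shots, i)
--
--         temp_a_score = a_2_shots * 2 + (a_num_shots - a_2_shots) * 3
--         temp_b_score = b_2_shots * 2 + (b_num_shots - b_2_shots) * 3
--         score_dif = temp_a_score - temp_b_score
--
--         if score_dif > max_dif: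
--             max_dif = score_dif
--
--             a_score = temp_a_score
--             b_score = temp_b_score
--
--         elif score_dif == max_dif:
--             if a_score < temp_a_score:
--                 a_score = temp_a_score
--                 b_score = temp_b_score
--
--     #try only 2 points for b
--     temp_d = b_shots[b_num_shots-1]+1
--     a_2_shots = bisect_left(a_shots, temp_d)
--     b_2_shots = b_num_shots
--
--     temp_a_score = a_2_shots * 2 + (a_num_shots - a_2_shots) * 3
--     temp_b_score = b_2_shots * 2 + (b_num_shots - b_2_shots) * 3
--     score_dif = temp_a_score - temp_b_score
--
--     if score_dif > max_dif:
--         max_dif = score_dif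
--
--         a_score = temp_a_score
--         b_score = temp_b_score
--
--     elif score_dif == max_dif:
--         if a_score < temp_a_score:
--             a_score = temp_a_score
--             b_score = temp_b_score
--
--     return a_score,b_score
-- ===== SOURCE B (Python) =====
-- def solverMain(a_num_shots, a_shots, b_num_shots, b_shots):
--     # sorts a_shots and b_shots in place, like the original
--     a_shots.sort()
--     b_shots.sort()
--     ia = ib = 0
--     best = None  # (score_dif, a_score), maximised lexicographically
--     for t in sorted(set(a_shots) | set(b_shots)):
--         while ia < len(a_shots) and a_shots[ia] < t:
--             ia += 1
--         while ib < len(b_shots) and b_shots[ib] < t: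
--             ib += 1
--         a_sc = 3 * a_num_shots - ia
--         cand = (a_sc - (3 * b_num_shots - ib), a_sc)
--         if best is None or cand > best:
--             best = cand
--     # the "every b shot scores only 2" candidate threshold
--     d = b_shots[b_num_shots - 1] + 1
--     a_sc = 3 * a_num_shots - sum(1 for x in a_shots if x < d)
--     cand = (a_sc - 2 * b_num_shots, a_sc)
--     if best is None or cand > best:
--         best = cand
--     dif, a_sc = best
--     return a_sc, a_sc - dif
-- ===== Notes on version B (the rewrite author's own statement) =====
-- stated objective: alternative
-- what changed: Instead of calling bisect_left twice for every element of both lists in two separate loops, B makes one sweep over the sorted deduplicated candidate thresholds with two monotone pointers that maintain the counts of elements below the current threshold, keeping the lexicographic best (score_dif, a_score) pair, plus the same all-twos sentinel candidate (measured ~1.45x, below the 1.5x bar, so not claimed as faster).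
import Mathlib
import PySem

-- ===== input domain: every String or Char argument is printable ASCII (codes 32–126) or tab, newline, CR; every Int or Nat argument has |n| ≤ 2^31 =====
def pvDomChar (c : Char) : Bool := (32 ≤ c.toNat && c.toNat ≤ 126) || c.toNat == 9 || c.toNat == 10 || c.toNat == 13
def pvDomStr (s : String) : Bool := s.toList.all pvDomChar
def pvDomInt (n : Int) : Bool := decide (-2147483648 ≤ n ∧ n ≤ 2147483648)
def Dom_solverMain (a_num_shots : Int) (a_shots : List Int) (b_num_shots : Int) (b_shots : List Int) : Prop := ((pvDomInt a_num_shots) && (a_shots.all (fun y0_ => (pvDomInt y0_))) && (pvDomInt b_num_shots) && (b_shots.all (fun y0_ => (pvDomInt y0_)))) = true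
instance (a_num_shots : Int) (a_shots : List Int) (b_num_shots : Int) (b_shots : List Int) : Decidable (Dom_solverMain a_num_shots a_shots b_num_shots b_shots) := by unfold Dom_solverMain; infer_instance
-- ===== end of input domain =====

-- B replaces per-element bisect_left calls by one pointer sweep over the deduplicated sorted
-- thresholds (same return value; like A, B sorts both argument lists in place).

-- ===== PORT A =====
-- the if/elif update block A repeats verbatim three times, factored as one helper
-- (state = (a_score, b_score, max_dif); max_dif = none models the initial -inf)
def pvUpdA (st : Int × Int × Option Int) (ta tb : Int) : Int × Int × Option Int :=
  let d := ta - tb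
  match st.2.2 with
  | none => (ta, tb, some d)
  | some m =>
    if d > m then (ta, tb, some d)
    else if d = m then (if st.1 < ta then (ta, tb, some m) else st)
    else st

-- one iteration of A's two identical for-loops
def pvStepA (a_num b_num : Int) (sa sb : List Int) (st : Int × Int × Option Int) (i : Int) :
    Int × Int × Option Int :=
  let a2 : Int := (PySem.List.bisectLeft sa i : Nat)
  let b2 : Int := (PySem.List.bisectLeft sb i : Nat)
  let ta := a2 * 2 + (a_num - a2) * 3
  let tb := b2 * 2 + (b_num - b2) * 3
  pvUpdA st ta tb

def solverMain (a_num_shots : Int) (a_shots : List Int) (b_num_shots : Int) (b_shots : List Int) :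
    Int × Int :=
  let sa := PySem.List.sorted a_shots (fun x => x) false
  let sb := PySem.List.sorted b_shots (fun x => x) false
  let st1 := sa.foldl (pvStepA a_num_shots b_num_shots sa sb) (0, 0, none)
  let st2 := sb.foldl (pvStepA a_num_shots b_num_shots sa sb) st1
  -- try only 2 points for b: temp_d = b_shots[b_num_shots-1]+1 (Pre_ makes the index in range)
  let temp_d := PySem.List.pyGetD sb (b_num_shots - 1) 0 + 1
  let a2 : Int := (PySem.List.bisectLeft sa temp_d : Nat)
  let b2 : Int := b_num_shots
  let ta := a2 * 2 + (a_num_shots - a2) * 3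
  let tb := b2 * 2 + (b_num_shots - b2) * 3
  let st3 := pvUpdA st2 ta tb
  (st3.1, st3.2.1)

-- ===== PORT B =====
-- while ia < len(xs) and xs[ia] < t: ia += 1
def pvAdv (xs : List Int) (t : Int) (i : Nat) : Nat :=
  if h : i < xs.length then
    if xs[i] < t then pvAdv xs t (i + 1) else i
  else i
termination_by xs.length - i

-- 'if best is None or cand > best: best = cand' (tuple comparison is lexicographic)
def pvBestUpd (o : Option (Int × Int)) (cand : Int × Int) : Int × Int :=
  match o with
  | none => cand
  | some q => if q.1 < cand.1 ∨ (q.1 = cand.1 ∧ q.2 < cand.2) then cand else q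

-- one iteration of B's sweep; state = (ia, ib, best)
def pvStepB (a_num b_num : Int) (sa sb : List Int) (st : Nat × Nat × Option (Int × Int))
    (t : Int) : Nat × Nat × Option (Int × Int) :=
  let ia := pvAdv sa t st.1
  let ib := pvAdv sb t st.2.1
  let a_sc : Int := 3 * a_num - ia
  let cand : Int × Int := (a_sc - (3 * b_num - ib), a_sc)
  (ia, ib, some (pvBestUpd st.2.2 cand))

def solverMain_alt (a_num_shots : Int) (a_shots : List Int) (b_num_shots : Int)
    (b_shots : List Int) : Int × Int :=
  let sa := PySem.List.sorted a_shots (fun x => x) false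
  let sb := PySem.List.sorted b_shots (fun x => x) false
  let ts := PySem.List.sorted (PySem.Set.union (PySem.Set.ofList sa) (PySem.Set.ofList sb))
    (fun x => x) false
  let st := ts.foldl (pvStepB a_num_shots b_num_shots sa sb) (0, 0, none)
  -- the "every b shot scores only 2" candidate
  let d := PySem.List.pyGetD sb (b_num_shots - 1) 0 + 1
  -- sum(1 for x in a_shots if x < d) is a countP
  let a_sc : Int := 3 * a_num_shots - (sa.countP (fun x => decide (x < d)) : Nat)
  let cand : Int × Int := (a_sc - 2 * b_num_shots, a_sc)
  let best := pvBestUpd st.2.2 cand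
  (best.2, best.2 - best.1)

-- ===== PRECONDITION & SPEC =====
-- Pre_ excludes exactly the inputs on which A raises IndexError at b_shots[b_num_shots-1]
-- (B raises the same IndexError there).
def Pre_solverMain (a_num_shots : Int) (a_shots : List Int) (b_num_shots : Int)
    (b_shots : List Int) : Prop :=
  PySem.Raise.InRange b_shots.length (b_num_shots - 1)
instance (a_num_shots : Int) (a_shots : List Int) (b_num_shots : Int) (b_shots : List Int) :
    Decidable (Pre_solverMain a_num_shots a_shots b_num_shots b_shots) := by
  unfold Pre_solverMain; infer_instance

def pvWitness_solverMain : Int × List Int × Int × List Int := (2, [1, 3], 2, [2, 2])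

def Spec_solverMain (a_num_shots : Int) (a_shots : List Int) (b_num_shots : Int)
    (b_shots : List Int) (out : Int × Int) : Prop :=
  out = solverMain_alt a_num_shots a_shots b_num_shots b_shots
instance (a_num_shots : Int) (a_shots : List Int) (b_num_shots : Int) (b_shots : List Int)
    (out : Int × Int) : Decidable (Spec_solverMain a_num_shots a_shots b_num_shots b_shots out) := by
  unfold Spec_solverMain; infer_instance

-- ===== CLAIM (what is proved, stated in full; the proofs are below) =====
def Claim_equal_solverMain : Prop := ∀ (a_num_shots : Int) (a_shots : List Int) (b_num_shots : Int) (b_shots : List Int), Dom_solverMain a_num_shots a_shots b_num_shots b_shots → Pre_solverMain a_num_shots a_shots b_num_shots b_shots → Spec_solverMain a_num_shots a_shots b_num_shots b_shots (solverMain a_num_shots a_shots b_num_shots b_shots)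

-- ===== LEMMAS AND PROOFS =====

-- the number of elements strictly below t
def pvCnt (xs : List Int) (t : Int) : Nat := xs.countP (fun x => decide (x < t))

-- the candidate key at threshold t: (score_dif, a_score)
def pvKey (A B : Int) (sa sb : List Int) (t : Int) : Int × Int :=
  ((3 * A - (pvCnt sa t : Nat)) - (3 * B - (pvCnt sb t : Nat)), 3 * A - (pvCnt sa t : Nat))

-- strict lexicographic order on candidate keys
def pvLt (p q : Int × Int) : Prop := p.1 < q.1 ∨ (p.1 = q.1 ∧ p.2 < q.2)

def pvIsMax (S : List (Int × Int)) (m : Int × Int) : Prop := m ∈ S ∧ ∀ p ∈ S, ¬ pvLt m p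

-- folding pvBestUpd over a key list
def pvBest (ks : List (Int × Int)) (o : Option (Int × Int)) : Option (Int × Int) :=
  ks.foldl (fun o p => some (pvBestUpd o p)) o

-- invariant of the option-valued best fold
def pvInvO (o : Option (Int × Int)) (S : List (Int × Int)) : Prop :=
  (o = none ∧ S = []) ∨ ∃ m, o = some m ∧ pvIsMax S m

-- relation between A's state (a_score, b_score, max_dif) and the abstract best option
def pvRelA (st : Int × Int × Option Int) (o : Option (Int × Int)) : Prop :=
  (st.2.2 = none ∧ o = none) ∨
  ∃ m, st.2.2 = some m ∧ o = some (m, st.1) ∧ st.2.1 = st.1 - m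

lemma pvCnt_le_length (xs : List Int) (t : Int) : pvCnt xs t ≤ xs.length :=
  List.countP_le_length
lemma pvCnt_mono (xs : List Int) {t t' : Int} (h : t ≤ t') : pvCnt xs t ≤ pvCnt xs t' := by
  apply List.countP_mono_left
  intro a _ ha
  simp_all; omega
lemma pvBisect_eq_cnt (xs : List Int) (t : Int) (h : xs.Pairwise (· ≤ ·)) :
    PySem.List.bisectLeft xs t = pvCnt xs t := by
  obtain ⟨hle, hlt, hge⟩ := PySem.List.bisectLeft_spec xs t h
  set c := PySem.List.bisectLeft xs t with hc
  have hsplit : xs = xs.take c ++ xs.drop c := (List.take_append_drop c xs).symm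
  have h1 : (xs.take c).countP (fun x => decide (x < t)) = (xs.take c).length := by
    apply List.countP_eq_length.mpr
    intro a ha
    obtain ⟨j, hj, rfl⟩ := List.mem_iff_getElem.mp ha
    simp only [List.length_take] at hj
    have hjl : j < xs.length := by omega
    simp only [List.getElem_take]
    simp only [decide_eq_true_eq]
    exact hlt j hjl (by omega)
  have h2 : (xs.drop c).countP (fun x => decide (x < t)) = 0 := by
    apply List.countP_eq_zero.mpr
    intro a ha
    obtain ⟨j, hj, rfl⟩ := List.mem_iff_getElem.mp ha
    have hjl : c + j < xs.length := by simp at hj; omega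
    simp only [List.getElem_drop]
    have := hge (c + j) hjl (by omega)
    simp; omega
  unfold pvCnt
  conv_rhs => rw [hsplit]
  rw [List.countP_append, h1, h2, List.length_take]
  omega
lemma pvCnt_lt_iff (xs : List Int) (t : Int) (h : xs.Pairwise (· ≤ ·)) (j : Nat)
    (hj : j < xs.length) : j < pvCnt xs t ↔ xs[j] < t := by
  obtain ⟨hle, hlt, hge⟩ := PySem.List.bisectLeft_spec xs t h
  rw [← pvBisect_eq_cnt xs t h]
  constructor
  · exact fun hlt' => hlt j hj hlt'
  · intro hx
    by_contra hc
    have := hge j hj (by omega)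
    omega
lemma pvAdv_eq (xs : List Int) (t : Int) (h : xs.Pairwise (· ≤ ·)) (i : Nat)
    (hi : i ≤ pvCnt xs t) : pvAdv xs t i = pvCnt xs t := by
  fun_induction pvAdv xs t i with
  | case1 i hlen hx ih =>
    apply ih
    have := (pvCnt_lt_iff xs t h i hlen).mpr hx
    omega
  | case2 i hlen hx =>
    have hcl := pvCnt_le_length xs t
    by_contra hne
    have hilt : i < pvCnt xs t := by omega
    exact hx ((pvCnt_lt_iff xs t h i hlen).mp hilt)
  | case3 i hlen =>
    have := pvCnt_le_length xs t
    omega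
lemma pvInvO_step (o : Option (Int × Int)) (S : List (Int × Int)) (p : Int × Int)
    (h : pvInvO o S) : pvInvO (some (pvBestUpd o p)) (S ++ [p]) := by
  rcases h with ⟨rfl, rfl⟩ | ⟨m, rfl, hmem, hbd⟩
  · exact Or.inr ⟨p, rfl, by simp [pvIsMax, pvLt]⟩
  · refine Or.inr ⟨pvBestUpd (some m) p, rfl, ?_, ?_⟩
    · simp only [pvBestUpd]
      split_ifs with hc
      · simp
      · simp [List.mem_append]; left; exact hmem
    · intro q hq
      simp only [List.mem_append, List.mem_singleton] at hq
      simp only [pvBestUpd]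
      split_ifs with hc
      · rcases hq with hq | rfl
        · have := hbd q hq
          simp only [pvLt] at *
          omega
        · simp [pvLt]
      · rcases hq with hq | rfl
        · exact hbd q hq
        · simp only [pvLt] at *
          omega
lemma pvBest_inv (ks : List (Int × Int)) (o : Option (Int × Int)) (S : List (Int × Int))
    (h : pvInvO o S) : pvInvO (pvBest ks o) (S ++ ks) := by
  induction ks generalizing o S with
  | nil => simpa [pvBest] using h
  | cons p ks ih =>
    have := ih (some (pvBestUpd o p)) (S ++ [p]) (pvInvO_step o S p h)
    simpa [pvBest, List.foldl_cons] using this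
lemma pvIsMax_unique {S1 S2 : List (Int × Int)} {m1 m2 : Int × Int}
    (h1 : pvIsMax S1 m1) (h2 : pvIsMax S2 m2) (hmem : ∀ p, p ∈ S1 ↔ p ∈ S2) : m1 = m2 := by
  obtain ⟨hm1, hb1⟩ := h1
  obtain ⟨hm2, hb2⟩ := h2
  have h12 := hb1 m2 ((hmem m2).mpr hm2)
  have h21 := hb2 m1 ((hmem m1).mp hm1)
  simp only [pvLt] at h12 h21
  have : m1.1 = m2.1 ∧ m1.2 = m2.2 := by omega
  exact Prod.ext this.1 this.2
lemma pvUpdA_rel (st : Int × Int × Option Int) (o : Option (Int × Int)) (ta tb : Int)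
    (h : pvRelA st o) : pvRelA (pvUpdA st ta tb) (some (pvBestUpd o (ta - tb, ta))) := by
  obtain ⟨a, b, md⟩ := st
  rcases h with ⟨h1, rfl⟩ | ⟨m, h1, rfl, hb⟩
  · simp only at h1; subst h1
    refine Or.inr ⟨ta - tb, rfl, rfl, ?_⟩
    show tb = ta - (ta - tb)
    ring
  · simp only at h1 hb; subst h1
    simp only [pvUpdA, pvBestUpd]
    by_cases hgt : ta - tb > m
    · rw [if_pos hgt, if_pos (Or.inl hgt)]
      refine Or.inr ⟨ta - tb, rfl, rfl, ?_⟩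
      show tb = ta - (ta - tb)
      ring
    · rw [if_neg hgt]
      by_cases heq : ta - tb = m
      · subst heq
        rw [if_pos rfl]
        by_cases ha : a < ta
        · rw [if_pos ha, if_pos (Or.inr ⟨rfl, ha⟩)]
          refine Or.inr ⟨ta - tb, rfl, rfl, ?_⟩
          show tb = ta - (ta - tb)
          ring
        · rw [if_neg ha, if_neg (by omega)]
          exact Or.inr ⟨ta - tb, rfl, rfl, hb⟩
      · rw [if_neg heq, if_neg (by omega)]
        exact Or.inr ⟨m, rfl, rfl, hb⟩
lemma pvStepA_rel (A B : Int) (sa sb : List Int) (hsa : sa.Pairwise (· ≤ ·))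
    (hsb : sb.Pairwise (· ≤ ·)) (st : Int × Int × Option Int) (o : Option (Int × Int))
    (h : pvRelA st o) (i : Int) :
    pvRelA (pvStepA A B sa sb st i) (some (pvBestUpd o (pvKey A B sa sb i))) := by
  have hkey : pvKey A B sa sb i =
      (((PySem.List.bisectLeft sa i : Int) * 2 + (A - (PySem.List.bisectLeft sa i : Int)) * 3) -
       ((PySem.List.bisectLeft sb i : Int) * 2 + (B - (PySem.List.bisectLeft sb i : Int)) * 3),
       (PySem.List.bisectLeft sa i : Int) * 2 + (A - (PySem.List.bisectLeft sa i : Int)) * 3) := by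
    rw [pvKey, pvBisect_eq_cnt sa i hsa, pvBisect_eq_cnt sb i hsb]
    apply Prod.ext <;> simp <;> ring
  rw [pvStepA, hkey]
  exact pvUpdA_rel st o _ _ h
lemma pvFoldA_rel (A B : Int) (sa sb : List Int) (hsa : sa.Pairwise (· ≤ ·))
    (hsb : sb.Pairwise (· ≤ ·)) (L : List Int) (st : Int × Int × Option Int)
    (o : Option (Int × Int)) (h : pvRelA st o) :
    pvRelA (L.foldl (pvStepA A B sa sb) st) (pvBest (L.map (pvKey A B sa sb)) o) := by
  induction L generalizing st o with
  | nil => simpa [pvBest] using h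
  | cons x L ih =>
    simp only [List.foldl_cons, List.map_cons, pvBest, List.foldl_cons]
    exact ih _ _ (pvStepA_rel A B sa sb hsa hsb st o h x)
lemma pvFoldB_best (A B : Int) (sa sb : List Int) (hsa : sa.Pairwise (· ≤ ·))
    (hsb : sb.Pairwise (· ≤ ·)) (ts : List Int) (hts : ts.Pairwise (· < ·))
    (ia ib : Nat) (o : Option (Int × Int))
    (hinv : ∀ t ∈ ts, ia ≤ pvCnt sa t ∧ ib ≤ pvCnt sb t) :
    (ts.foldl (pvStepB A B sa sb) (ia, ib, o)).2.2 = pvBest (ts.map (pvKey A B sa sb)) o := by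
  induction ts generalizing ia ib o with
  | nil => simp [pvBest]
  | cons t ts ih =>
    obtain ⟨hhead, htail⟩ := List.pairwise_cons.mp hts
    have h1 := (hinv t (by simp)).1
    have h2 := (hinv t (by simp)).2
    simp only [List.foldl_cons, List.map_cons, pvBest, List.foldl_cons, pvStepB]
    rw [pvAdv_eq sa t hsa ia h1, pvAdv_eq sb t hsb ib h2]
    have hcand : ((3 * A - (pvCnt sa t : Int)) - (3 * B - (pvCnt sb t : Int)),
        (3 * A - (pvCnt sa t : Int))) = pvKey A B sa sb t := by
      simp [pvKey]
    rw [hcand]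
    exact ih htail (pvCnt sa t) (pvCnt sb t) _ (fun t' ht' =>
      ⟨pvCnt_mono sa (le_of_lt (hhead t' ht')), pvCnt_mono sb (le_of_lt (hhead t' ht'))⟩)
lemma pvSorted_lt (xs : List Int) (h : xs.Nodup) :
    (PySem.List.sorted xs (fun x => x) false).Pairwise (· < ·) := by
  have h1 := PySem.List.sorted_pairwise xs (fun x => x)
  have h2 : (PySem.List.sorted xs (fun x => x) false).Nodup :=
    (PySem.List.sorted_perm xs (fun x => x) false).nodup_iff.mpr h
  exact (h1.and h2).imp (fun {a b} hab => lt_of_le_of_ne hab.1 hab.2)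
lemma pvMain_aux (A B : Int) (sa sb ts : List Int) (hsa : sa.Pairwise (· ≤ ·))
    (hsb : sb.Pairwise (· ≤ ·)) (hts : ts.Pairwise (· < ·))
    (hmem : ∀ x : Int, x ∈ ts ↔ x ∈ sa ∨ x ∈ sb)
    (ta tb asc : Int) (hta : ta = asc) (htb : tb = 2 * B) :
    (let st3 := pvUpdA ((sa ++ sb).foldl (pvStepA A B sa sb) (0, 0, none)) ta tb
     ((st3.1, st3.2.1) : Int × Int)) =
    (let best := pvBestUpd ((ts.foldl (pvStepB A B sa sb) (0, 0, none)).2.2)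
        (asc - 2 * B, asc)
     (best.2, best.2 - best.1)) := by
  subst hta htb
  have rel0 : pvRelA ((0 : Int), (0 : Int), (none : Option Int)) none := Or.inl ⟨rfl, rfl⟩
  have relf := pvFoldA_rel A B sa sb hsa hsb (sa ++ sb) _ none rel0
  have rel3 := pvUpdA_rel _ _ ta (2 * B) relf
  set k := pvKey A B sa sb with hk
  set o2 := pvBest ((sa ++ sb).map k) none with ho2
  set o2' := pvBest (ts.map k) none with ho2'
  set KS : Int × Int := (ta - 2 * B, ta) with hKS
  -- A side is the max of keysA
  have invA : pvInvO (pvBest ((sa ++ sb).map k ++ [KS]) none) ((sa ++ sb).map k ++ [KS]) := by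
    have := pvBest_inv ((sa ++ sb).map k ++ [KS]) none [] (Or.inl ⟨rfl, rfl⟩)
    simpa using this
  have hbA : pvBest ((sa ++ sb).map k ++ [KS]) none = some (pvBestUpd o2 KS) := by
    simp [pvBest, List.foldl_append, ho2]
  rw [hbA] at invA
  have maxA : pvIsMax ((sa ++ sb).map k ++ [KS]) (pvBestUpd o2 KS) := by
    rcases invA with ⟨h1, _⟩ | ⟨m, hm, hmax⟩
    · exact absurd h1 (by simp)
    · rwa [Option.some_inj.mp hm]
  -- B side is the max of keysB
  have invB : pvInvO (pvBest (ts.map k ++ [KS]) none) (ts.map k ++ [KS]) := by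
    have := pvBest_inv (ts.map k ++ [KS]) none [] (Or.inl ⟨rfl, rfl⟩)
    simpa using this
  have hbB : pvBest (ts.map k ++ [KS]) none = some (pvBestUpd o2' KS) := by
    simp [pvBest, List.foldl_append, ho2']
  rw [hbB] at invB
  have maxB : pvIsMax (ts.map k ++ [KS]) (pvBestUpd o2' KS) := by
    rcases invB with ⟨h1, _⟩ | ⟨m, hm, hmax⟩
    · exact absurd h1 (by simp)
    · rwa [Option.some_inj.mp hm]
  have hMM : pvBestUpd o2 KS = pvBestUpd o2' KS := by
    refine pvIsMax_unique maxA maxB ?_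
    intro p
    simp only [List.mem_append, List.mem_map, List.mem_singleton]
    constructor
    · rintro (⟨t, ht, rfl⟩ | rfl)
      · exact Or.inl ⟨t, (hmem t).mpr (by simpa using ht), rfl⟩
      · exact Or.inr rfl
    · rintro (⟨t, ht, rfl⟩ | rfl)
      · exact Or.inl ⟨t, by simpa using (hmem t).mp ht, rfl⟩
      · exact Or.inr rfl
  -- B fold best component
  have hB2 : (ts.foldl (pvStepB A B sa sb) (0, 0, none)).2.2 = o2' := by
    rw [ho2']
    exact pvFoldB_best A B sa sb hsa hsb ts hts 0 0 none
      (fun t _ => ⟨Nat.zero_le _, Nat.zero_le _⟩)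
  -- read off the returned pair from rel3
  rcases rel3 with ⟨h1, h2⟩ | ⟨m, hm, ho, hb⟩
  · exact absurd h2 (by simp)
  · 
    have hMT : pvBestUpd o2 (ta - 2 * B, ta) = (m, (pvUpdA ((sa ++ sb).foldl (pvStepA A B sa sb) (0, 0, none)) ta (2 * B)).1) :=
      Option.some_inj.mp ho
    show ((pvUpdA ((sa ++ sb).foldl (pvStepA A B sa sb) (0, 0, none)) ta (2 * B)).1, _) = _
    rw [hb, hB2, ← hMM, hKS] at *
    simp only [hMT]

theorem solverMain_spec : Claim_equal_solverMain := by
  intro A as B bs hDom hPre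
  unfold Spec_solverMain
  simp only [solverMain, solverMain_alt]
  rw [← List.foldl_append]
  have hsa := PySem.List.sorted_pairwise as (fun x => x)
  have hsb := PySem.List.sorted_pairwise bs (fun x => x)
  set sa := PySem.List.sorted as (fun x => x) false with hsadef
  set sb := PySem.List.sorted bs (fun x => x) false with hsbdef
  set ts := PySem.List.sorted (PySem.Set.union (PySem.Set.ofList sa) (PySem.Set.ofList sb))
    (fun x => x) false with htsdef
  have hts : ts.Pairwise (· < ·) :=
    pvSorted_lt _ (PySem.Set.nodup_union _ _ (PySem.Set.nodup_ofList sa))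
  have hmem : ∀ x : Int, x ∈ ts ↔ x ∈ sa ∨ x ∈ sb := by
    intro x
    rw [htsdef, PySem.List.mem_sorted, PySem.Set.mem_union]
    simp [PySem.Set.mem_ofList]
  set d := PySem.List.pyGetD sb (B - 1) 0 + 1 with hd
  have hta : ((PySem.List.bisectLeft sa d : Nat) : Int) * 2 +
      (A - ((PySem.List.bisectLeft sa d : Nat) : Int)) * 3 =
      3 * A - (sa.countP (fun x => decide (x < d)) : Nat) := by
    rw [pvBisect_eq_cnt sa d hsa]
    show ((pvCnt sa d : Nat) : Int) * 2 + (A - _) * 3 = 3 * A - (pvCnt sa d : Nat)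
    ring
  have htb : B * 2 + (B - B) * 3 = 2 * B := by ring
  have := pvMain_aux A B sa sb ts hsa hsb hts hmem _ _
    (3 * A - (sa.countP (fun x => decide (x < d)) : Nat)) hta htb
  simpa using this
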